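-- pv_equiv track=rewrite | github.com/iamsmith21/EECS1015-LABS | Lab9Final.py | find_diplicates
-- ===== SOURCE A (Python) =====
-- def find_diplicates(a_dict):
--     empty_Dict = {}
--     for items in a_dict:
--         empty_Dict[a_dict[items]] = []
-- # Empty Dict : {'This': [], 'is': [], 'only': [], 'a': [], 'test': [], 'has': [], 'always': [], 'been': []}
-- # a_dict = {1: 'This', 2: 'is', 3: 'only', 4: 'a', 5: 'test', 6: 'This', 7: 'test', 8: 'has', 9: 'always',
--     # 10: 'been', 11: 'a', 12: 'test'}
--     final_dict = {}
--     for i in empty_Dict: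
--         final_list = []
--         for j in a_dict:
--             if i == a_dict[j]:
--                 final_list.append(j)
--         if len(final_list) >=2:
--             final_dict[i] = final_list
--
--     return final_dict
-- ===== SOURCE B (Python) =====
-- def find_diplicates(a_dict):
--     groups = {}
--     for k, v in a_dict.items():
--         groups.setdefault(v, []).append(k)
--     return {v: ks for v, ks in groups.items() if len(ks) >= 2}
-- ===== Notes on version B (the rewrite author's own statement) =====
-- stated objective: faster
-- what changed: Replaces A's pass that builds the set of distinct values followed by a full rescan of the dict per distinct value with a single pass that groups keys by value via setdefault, then filters groups with at least two keys.
import Mathlib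
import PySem

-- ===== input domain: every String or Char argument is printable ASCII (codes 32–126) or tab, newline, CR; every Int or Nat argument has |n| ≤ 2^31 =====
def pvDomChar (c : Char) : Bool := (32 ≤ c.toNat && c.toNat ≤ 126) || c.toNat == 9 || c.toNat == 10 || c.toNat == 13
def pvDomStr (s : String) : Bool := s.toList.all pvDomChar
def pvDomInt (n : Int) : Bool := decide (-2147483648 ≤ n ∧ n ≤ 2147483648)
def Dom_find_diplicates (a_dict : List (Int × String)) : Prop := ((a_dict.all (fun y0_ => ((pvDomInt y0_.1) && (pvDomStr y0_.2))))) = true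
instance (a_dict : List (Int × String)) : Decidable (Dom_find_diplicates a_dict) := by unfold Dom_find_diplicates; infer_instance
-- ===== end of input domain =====

-- B replaces A's rescan of the whole dict for every distinct value by a single
-- grouping pass (value -> list of keys) followed by a length filter (faster, asymptotic).


-- ===== PORT A =====
-- a_dict[k] : dict lookup on the input dict (always present for keys of the dict itself)
def pvLookup (a_dict : List (Int × String)) (k : Int) : String :=
  ((PySem.Dict.mk a_dict).get? k).getD ""

def find_diplicates (a_dict : List (Int × String)) : List (String × List Int) :=
  -- for items in a_dict: empty_Dict[a_dict[items]] = []
  let empty_Dict : PySem.Dict String (List Int) :=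
    a_dict.foldl (fun d kv => d.insert (pvLookup a_dict kv.1) ([] : List Int)) PySem.Dict.empty
  -- for i in empty_Dict: … for j in a_dict: if i == a_dict[j]: final_list.append(j)
  let final_dict : PySem.Dict String (List Int) :=
    empty_Dict.keys.foldl (fun fd i =>
      let final_list : List Int :=
        a_dict.foldl (fun fl kv => if i == pvLookup a_dict kv.1 then fl ++ [kv.1] else fl) []
      if final_list.length ≥ 2 then fd.insert i final_list else fd) PySem.Dict.empty
  final_dict.items

-- ===== PORT B =====
def find_diplicates_alt (a_dict : List (Int × String)) : List (String × List Int) :=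
  -- groups.setdefault(v, []).append(k)  ==  groups[v] = groups.get(v, []) + [k]
  let groups : PySem.Dict String (List Int) :=
    a_dict.foldl (fun d kv => d.modify kv.2 ([] : List Int) (· ++ [kv.1])) PySem.Dict.empty
  groups.items.filter (fun p => p.2.length ≥ 2)

-- ===== PRECONDITION & SPEC =====
-- Pre_ restricts to association lists with pairwise-distinct keys: only those represent a
-- Python dict (A's parameter is a dict, whose keys are necessarily distinct).
def Pre_find_diplicates (a_dict : List (Int × String)) : Prop :=
  (a_dict.map Prod.fst).Nodup
instance (a_dict : List (Int × String)) : Decidable (Pre_find_diplicates a_dict) := by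
  unfold Pre_find_diplicates; infer_instance

def pvWitness_find_diplicates : (List (Int × String)) :=
  [(1, "a"), (2, "b"), (3, "a"), (4, "c"), (5, "b")]

def Spec_find_diplicates (a_dict : List (Int × String)) (out : List (String × List Int)) : Prop := out = find_diplicates_alt a_dict
instance (a_dict : List (Int × String)) (out : List (String × List Int)) : Decidable (Spec_find_diplicates a_dict out) := by unfold Spec_find_diplicates; infer_instance

-- ===== CLAIM (what is proved, stated in full; the proofs are below) =====
def Claim_equal_find_diplicates : Prop := ∀ (a_dict : List (Int × String)), Dom_find_diplicates a_dict → Pre_find_diplicates a_dict → Spec_find_diplicates a_dict (find_diplicates a_dict)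

-- ===== LEMMAS AND PROOFS =====

-- Under distinct keys, looking a key of the dict up returns that pair's value.
theorem pvLookup_eq (a_dict : List (Int × String)) (hnd : (a_dict.map Prod.fst).Nodup)
    (kv : Int × String) (hmem : kv ∈ a_dict) : pvLookup a_dict kv.1 = kv.2 := by
  have h : (PySem.Dict.mk a_dict).get? kv.1 = some kv.2 := by
    apply PySem.Dict.get?_of_mem_items
    · simpa using hmem
    · simpa [PySem.Dict.keys] using hnd
  simp [pvLookup, h]

-- A's per-value inner scan, as a filter
theorem finalList_eq (a_dict : List (Int × String)) (hnd : (a_dict.map Prod.fst).Nodup)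
    (i : String) :
    a_dict.foldl (fun fl kv => if i == pvLookup a_dict kv.1 then fl ++ [kv.1] else fl) [] =
      ((a_dict.filter (fun kv => kv.2 == i)).map Prod.fst) := by
  have h1 : a_dict.foldl (fun fl kv => if i == pvLookup a_dict kv.1 then fl ++ [kv.1] else fl) [] =
      a_dict.foldl (fun fl kv => if kv.2 == i then fl ++ [kv.1] else fl) [] := by
    apply PySem.List.foldl_congr_mem
    intro acc kv hkv
    rw [pvLookup_eq a_dict hnd kv hkv]
    rcases eq_or_ne i kv.2 with h | h
    · simp [h]
    · simp [beq_iff_eq, h, h.symm]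
  rw [h1]
  simpa using PySem.List.foldl_append_if (l := a_dict) (p := fun kv => kv.2 == i)
    (f := Prod.fst) (acc := [])

-- A fresh-key conditional-insert loop appends its inserted pairs in order.
theorem foldl_insert_if_items (g : String → List Int)
    (ks : List String) (d : PySem.Dict String (List Int)) (hnd : ks.Nodup)
    (hfresh : ∀ i ∈ ks, d.contains i = false) :
    (ks.foldl (fun fd i => if (g i).length ≥ 2 then fd.insert i (g i) else fd) d).items =
      d.items ++ ((ks.filter (fun i => decide ((g i).length ≥ 2))).map (fun i => (i, g i))) := by
  induction ks generalizing d with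
  | nil => simp
  | cons k ks ih =>
    obtain ⟨hknot, hnd'⟩ := List.nodup_cons.mp hnd
    have hk : d.contains k = false := hfresh k (by simp)
    by_cases hc : (g k).length ≥ 2
    · have hfresh' : ∀ i ∈ ks, (d.insert k (g k)).contains i = false := by
        intro i hi
        have hne : i ≠ k := fun h => hknot (h ▸ hi)
        rw [PySem.Dict.contains_insert]
        simp [hne, hfresh i (by simp [hi])]
      simp only [List.foldl_cons, List.filter_cons, hc, if_true, decide_true, List.map_cons]
      rw [ih _ hnd' hfresh', PySem.Dict.items_insert]
      simp [hk]
    · have hfresh' : ∀ i ∈ ks, d.contains i = false := fun i hi => hfresh i (by simp [hi])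
      simp only [List.foldl_cons, List.filter_cons, hc, if_false, decide_false]
      exact ih _ hnd' hfresh'

-- B's grouping dict, looked up
theorem groups_getD (a_dict : List (Int × String)) (v : String) :
    (a_dict.foldl (fun d kv => d.modify kv.2 ([] : List Int) (· ++ [kv.1]))
        PySem.Dict.empty).getD v [] =
      ((a_dict.filter (fun kv => kv.2 == v)).map Prod.fst) := by
  have hm : a_dict.foldl (fun d kv => d.modify kv.2 ([] : List Int) (· ++ [kv.1]))
        PySem.Dict.empty =
      (a_dict.map Prod.swap).foldl (fun d p => d.modify p.1 ([] : List Int) (· ++ [p.2]))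
        PySem.Dict.empty := by
    rw [List.foldl_map]
    rfl
  rw [hm, PySem.Dict.getD_foldl_modify_append]
  simp [List.filter_map, List.map_map, Function.comp_def, PySem.Dict.getD_empty]

theorem find_diplicates_eq (a_dict : List (Int × String))
    (hnd : (a_dict.map Prod.fst).Nodup) :
    find_diplicates a_dict = find_diplicates_alt a_dict := by
  have hkeysA : (a_dict.foldl (fun d kv => d.insert (pvLookup a_dict kv.1) ([] : List Int))
      PySem.Dict.empty).keys = PySem.Set.ofList (a_dict.map Prod.snd) := by
    have h1 : a_dict.foldl (fun d kv => d.insert (pvLookup a_dict kv.1) ([] : List Int))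
        PySem.Dict.empty =
        a_dict.foldl (fun d kv => d.insert kv.2 ([] : List Int)) PySem.Dict.empty := by
      apply PySem.List.foldl_congr_mem
      intro acc kv hkv
      rw [pvLookup_eq a_dict hnd kv hkv]
    rw [h1, PySem.Dict.keys_foldl_insert_key]
    simp [PySem.Dict.keys_empty, PySem.Set.update_nil_left]
  have hkeysB : (a_dict.foldl (fun d kv => d.modify kv.2 ([] : List Int) (· ++ [kv.1]))
      PySem.Dict.empty).keys = PySem.Set.ofList (a_dict.map Prod.snd) := by
    rw [PySem.Dict.keys_foldl_modify_key]
    simp [PySem.Dict.keys_empty, PySem.Set.update_nil_left]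
  have hndB : (a_dict.foldl (fun d kv => d.modify kv.2 ([] : List Int) (· ++ [kv.1]))
      PySem.Dict.empty).keys.Nodup := by
    rw [hkeysB]; exact PySem.Set.nodup_ofList _
  have hndK : (PySem.Set.ofList (a_dict.map Prod.snd)).Nodup := PySem.Set.nodup_ofList _
  -- the outer loop body, with the inner scan replaced by its filter form
  have hfun : (fun (fd : PySem.Dict String (List Int)) (i : String) =>
      let final_list : List Int :=
        a_dict.foldl (fun fl kv => if i == pvLookup a_dict kv.1 then fl ++ [kv.1] else fl) []
      if final_list.length ≥ 2 then fd.insert i final_list else fd) =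
      (fun fd i => if (((a_dict.filter (fun kv => kv.2 == i)).map Prod.fst)).length ≥ 2 then
          fd.insert i ((a_dict.filter (fun kv => kv.2 == i)).map Prod.fst) else fd) := by
    funext fd i
    simp only [finalList_eq a_dict hnd i]
  simp only [find_diplicates, find_diplicates_alt]
  rw [hkeysA, hfun,
    foldl_insert_if_items (fun i => (a_dict.filter (fun kv => kv.2 == i)).map Prod.fst)
      _ _ hndK (fun i _ => PySem.Dict.contains_empty i)]
  rw [PySem.Dict.items_eq_map_keys _ hndB ([] : List Int), hkeysB, List.filter_map]
  have hfeq : (fun k => (k, (a_dict.foldl (fun d kv => d.modify kv.2 ([] : List Int) (· ++ [kv.1]))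
        PySem.Dict.empty).getD k [])) =
      fun k => (k, (a_dict.filter (fun kv => kv.2 == k)).map Prod.fst) :=
    funext fun k => by rw [groups_getD]
  rw [hfeq]
  simp [Function.comp_def]
  rfl

-- ===== VERDICT (by name: the statement is the Claim_ definition above) =====
theorem find_diplicates_spec : Claim_equal_find_diplicates := by
  intro a_dict _ hpre
  unfold Spec_find_diplicates
  exact find_diplicates_eq a_dict hpre
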